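-- pv_equiv track=rewrite | github.com/stallmanifold/codewars | python/src/codewars/kyu3/base64_encoding2.py | to_base64_iter
-- ===== SOURCE A (Python) =====
-- def to_base64_iter(buf):
--     rem_shift   = { 0: 4, 2: 2, 4: 0 }
--     rem_mask    = { 0: 0x03, 2: 0x0F, 4: 0x3F }
--     sextet_mask = { 0: 0xFC, 2: 0xF0, 4: 0xC0 }
--
--     buf_size = len(buf)
--     bits_in_rem = 0
--     rem = 0
--     sextet = 0
--     i = 0
--     while i < buf_size:
--         if bits_in_rem < 6:
--             sextet = ((buf[i] & sextet_mask[bits_in_rem]) >> (bits_in_rem + 2)) | rem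
--             rem = (buf[i] & rem_mask[bits_in_rem]) << rem_shift[bits_in_rem]
--             bits_in_rem += 2
--             i += 1
--         else:
--             assert bits_in_rem == 6, 'bits_in_rem != 6'
--             sextet = rem
--             rem = 0
--             bits_in_rem = 0
--
--         assert sextet & 0xC0 == 0
--         yield sextet
--
--     if bits_in_rem > 0:
--         # We have run out of bytes, but another sextets needs
--         # to be processed.
--         sextet = rem
--         rem = 0
--         bits_in_rem = 0
--
--         assert sextet & 0xC0 == 0
--         yield sextet
-- ===== SOURCE B (Python) =====
-- def to_base64_iter(buf):
--     # Chunked re-implementation: process the buffer three bytes at a time,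
--     # emitting four sextets per full chunk and the standard short tail.
--     data = list(buf)
--     n = len(data)
--     i = 0
--     while i + 3 <= n:
--         b0, b1, b2 = data[i], data[i + 1], data[i + 2]
--         yield (b0 & 0xFC) >> 2
--         yield ((b0 & 0x03) << 4) | ((b1 & 0xF0) >> 4)
--         yield ((b1 & 0x0F) << 2) | ((b2 & 0xC0) >> 6)
--         yield b2 & 0x3F
--         i += 3
--     tail = data[i:]
--     if len(tail) == 2:
--         b0, b1 = tail
--         yield (b0 & 0xFC) >> 2
--         yield ((b0 & 0x03) << 4) | ((b1 & 0xF0) >> 4)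
--         yield (b1 & 0x0F) << 2
--     elif len(tail) == 1:
--         b0 = tail[0]
--         yield (b0 & 0xFC) >> 2
--         yield (b0 & 0x03) << 4
-- ===== Notes on version B (the rewrite author's own statement) =====
-- stated objective: simpler
-- what changed: Replaced A's byte-at-a-time state machine (bits_in_rem/rem/sextet carried across while-loop iterations with three lookup dicts) by a plain loop over 3-byte chunks that emits four sextets per full chunk and a 2- or 3-sextet tail directly.
import Mathlib
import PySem

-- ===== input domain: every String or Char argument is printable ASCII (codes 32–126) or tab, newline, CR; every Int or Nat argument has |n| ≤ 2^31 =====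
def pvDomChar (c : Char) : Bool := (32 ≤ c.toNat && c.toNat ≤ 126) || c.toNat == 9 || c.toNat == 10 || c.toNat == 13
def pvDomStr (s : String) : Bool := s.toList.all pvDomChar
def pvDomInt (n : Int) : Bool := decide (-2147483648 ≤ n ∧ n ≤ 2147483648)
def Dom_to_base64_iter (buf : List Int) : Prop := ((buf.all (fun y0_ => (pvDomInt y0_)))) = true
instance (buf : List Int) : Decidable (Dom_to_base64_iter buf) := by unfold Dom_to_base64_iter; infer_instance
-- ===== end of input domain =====

-- B replaces A's byte-at-a-time sextet state machine (bits_in_rem/rem carried across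
-- iterations) by a plain 3-byte-chunk loop emitting four sextets per chunk (objective: simpler).

-- ===== PORT A =====
-- A's three lookup dicts, keyed by bits_in_rem ∈ {0,2,4}
def pvRemShift (bits : Nat) : Nat := if bits = 0 then 4 else if bits = 2 then 2 else 0
def pvRemMask (bits : Nat) : Int := if bits = 0 then 0x03 else if bits = 2 then 0x0F else 0x3F
def pvSextetMask (bits : Nat) : Int := if bits = 0 then 0xFC else if bits = 2 then 0xF0 else 0xC0

-- A's while loop; the index i / buf[i] is represented by the remaining suffix of buf
-- (i never skips or revisits: it advances by exactly 1 when a byte is consumed).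
-- The final `if bits_in_rem > 0: yield rem` is the [] case.
def pvLoopA : List Int → Nat → Int → List Int
  | [], bits, rem => if bits > 0 then [rem] else []
  | b :: rest, bits, rem =>
    if bits < 6 then
      let sextet := PySem.Int.bor ((PySem.Int.band b (pvSextetMask bits)) >>> (bits + 2)) rem
      let rem' := (PySem.Int.band b (pvRemMask bits)) <<< (pvRemShift bits)
      sextet :: pvLoopA rest (bits + 2) rem'
    else
      rem :: pvLoopA (b :: rest) 0 0
  termination_by l bits _ => 2 * l.length + (if bits < 6 then 0 else 1)
  decreasing_by all_goals simp only [List.length_cons]; split <;> omega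

def to_base64_iter (buf : List Int) : List Int := pvLoopA buf 0 0

-- ===== PORT B =====
def to_base64_iter_alt : List Int → List Int
  | b0 :: b1 :: b2 :: rest =>
      ((PySem.Int.band b0 0xFC) >>> (2 : Nat))
        :: (PySem.Int.bor ((PySem.Int.band b0 0x03) <<< (4 : Nat)) ((PySem.Int.band b1 0xF0) >>> (4 : Nat)))
        :: (PySem.Int.bor ((PySem.Int.band b1 0x0F) <<< (2 : Nat)) ((PySem.Int.band b2 0xC0) >>> (6 : Nat)))
        :: (PySem.Int.band b2 0x3F)
        :: to_base64_iter_alt rest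
  | [b0, b1] =>
      [((PySem.Int.band b0 0xFC) >>> (2 : Nat)),
       (PySem.Int.bor ((PySem.Int.band b0 0x03) <<< (4 : Nat)) ((PySem.Int.band b1 0xF0) >>> (4 : Nat))),
       ((PySem.Int.band b1 0x0F) <<< (2 : Nat))]
  | [b0] => [((PySem.Int.band b0 0xFC) >>> (2 : Nat)), ((PySem.Int.band b0 0x03) <<< (4 : Nat))]
  | [] => []

-- ===== PRECONDITION & SPEC =====
def Spec_to_base64_iter (buf : List Int) (out : List Int) : Prop := out = to_base64_iter_alt buf
instance (buf : List Int) (out : List Int) : Decidable (Spec_to_base64_iter buf out) := by unfold Spec_to_base64_iter; infer_instance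

-- ===== CLAIM (what is proved, stated in full; the proofs are below) =====
def Claim_equal_to_base64_iter : Prop := ∀ (buf : List Int), Dom_to_base64_iter buf → Spec_to_base64_iter buf (to_base64_iter buf)

-- ===== LEMMAS AND PROOFS =====

theorem pv_zero_bor (x : Int) : PySem.Int.bor 0 x = x := by
  rw [PySem.Int.bor_comm]; simp

-- With a full remainder (bits_in_rem = 6) A's loop first flushes rem and resets the state.
theorem pvLoopA_six (l : List Int) (rem : Int) : pvLoopA l 6 rem = rem :: pvLoopA l 0 0 := by
  cases l with
  | nil => simp [pvLoopA]
  | cons b t => rw [pvLoopA]; simp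

-- A's state machine, started fresh, produces exactly B's chunked output.
theorem pvLoopA_eq_alt (l : List Int) : pvLoopA l 0 0 = to_base64_iter_alt l := by
  induction l using to_base64_iter_alt.induct with
  | case1 b0 b1 b2 rest ih =>
      simp [pvLoopA, pvSextetMask, pvRemMask, pvRemShift, to_base64_iter_alt,
            pvLoopA_six, ih, PySem.Int.bor_comm, pv_zero_bor]
  | case2 b0 b1 =>
      simp [pvLoopA, pvSextetMask, pvRemMask, pvRemShift, to_base64_iter_alt,
            PySem.Int.bor_comm, pv_zero_bor]
  | case3 b0 =>
      simp [pvLoopA, pvSextetMask, pvRemMask, pvRemShift, to_base64_iter_alt]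
  | case4 =>
      simp [pvLoopA, to_base64_iter_alt]

-- ===== VERDICT (by name: the statement is the Claim_ definition above) =====
theorem to_base64_iter_spec : Claim_equal_to_base64_iter := by
  intro buf _
  unfold Spec_to_base64_iter to_base64_iter
  exact pvLoopA_eq_alt buf
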